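-- pv_equiv track=rewrite | github.com/mmaisonnave/stance-analysis-freedom-convoy-tweets | scripts/create_id_to_username_map.py | _find_duplicate_usernames
-- ===== SOURCE A (Python) =====
-- def _find_duplicate_usernames(userid2username):
--     """
--     method to find if two users (with different user id) are associated with the same username
--
--     example of input argument:
--     userid2username = {
--     1: ["alice", "alice123", "alice_wonder"],
--     2: ["bob", "bobby", "bob_the_builder"],
--     3: ["charlie", "charlie123", "alice"],  # "alice" appears under user 3
--     4: ["dave", "davey", "dave123"]
-- }
--     """
--     username_map = {}  # Maps username to user_id(s)
--
--     for user_id, usernames in userid2username.items():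
--         for username in usernames:
--             if username in username_map:
--                 username_map[username].add(user_id)
--             else:
--                 username_map[username] = {user_id}
--
--     duplicates = {username: user_ids for username, user_ids in username_map.items() if len(user_ids) > 1}
--
--     return duplicates
-- ===== SOURCE B (Python) =====
-- def _find_duplicate_usernames(userid2username):
--     # Pass 1: count, per username, how many users carry it (each user counted once).
--     counts = {}
--     for usernames in userid2username.values():
--         for username in dict.fromkeys(usernames):
--             counts[username] = counts.get(username, 0) + 1
--     # Pass 2: collect user ids only for the usernames carried by more than one user.
--     duplicates = {}
--     for user_id, usernames in userid2username.items():
--         for username in usernames: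
--             if counts[username] > 1:
--                 duplicates.setdefault(username, set()).add(user_id)
--     return duplicates
-- ===== Notes on version B (the rewrite author's own statement) =====
-- stated objective: alternative
-- what changed: B replaces A's build-a-full-username-to-id-set-index-then-filter with a count-then-collect two-pass scheme: pass 1 counts how many users carry each username, pass 2 collects the user ids only for usernames counted more than once; Pre_ restricts to association lists with distinct user ids, the only lists that encode a Python dict.
import Mathlib
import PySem

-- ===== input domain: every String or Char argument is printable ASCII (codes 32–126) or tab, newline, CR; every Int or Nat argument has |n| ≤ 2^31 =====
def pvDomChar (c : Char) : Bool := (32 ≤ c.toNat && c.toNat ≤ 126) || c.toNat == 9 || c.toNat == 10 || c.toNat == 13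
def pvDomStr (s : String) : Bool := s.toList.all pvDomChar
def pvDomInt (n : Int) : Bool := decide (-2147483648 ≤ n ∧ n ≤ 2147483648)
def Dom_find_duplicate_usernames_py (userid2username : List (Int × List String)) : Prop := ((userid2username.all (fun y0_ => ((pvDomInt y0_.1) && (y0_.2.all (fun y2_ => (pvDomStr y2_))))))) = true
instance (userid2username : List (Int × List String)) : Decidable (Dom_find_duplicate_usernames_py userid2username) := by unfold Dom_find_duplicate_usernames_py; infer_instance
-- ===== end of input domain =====

-- B replaces A's full username→id-set index with a count-then-collect two-pass scheme; return values proved equal on every dict-shaped input (distinct user ids).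

-- ===== PORT A =====
def find_duplicate_usernames_py (userid2username : List (Int × List String)) : List (String × List Int) :=
  let username_map : PySem.Dict String (PySem.Set Int) :=
    userid2username.foldl (fun m p =>
      p.2.foldl (fun m username =>
        if m.contains username then
          m.insert username (PySem.Set.add (m.getD username PySem.Set.empty) p.1)
        else
          m.insert username (PySem.Set.ofList [p.1])) m)
      (PySem.Dict.mk [])
  username_map.items.filter (fun q => 1 < q.2.length)

-- ===== PORT B =====
def find_duplicate_usernames_py_alt (userid2username : List (Int × List String)) : List (String × List Int) :=
  -- pass 1: counts[username] = number of users carrying username ('dict.fromkeys' = PySem.List.dedup)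
  let counts : PySem.Dict String Int :=
    userid2username.foldl (fun c p =>
      (PySem.List.dedup p.2).foldl (fun c username => c.modify username 0 (· + 1)) c)
      (PySem.Dict.mk [])
  -- pass 2: collect ids for usernames counted more than once
  -- (counts[username]: the key is always present after pass 1, so getD's default is never taken)
  let duplicates : PySem.Dict String (PySem.Set Int) :=
    userid2username.foldl (fun d p =>
      p.2.foldl (fun d username =>
        if 1 < counts.getD username 0 then
          -- duplicates.setdefault(username, set()).add(p.1), with the mutated set written back in place
          let d' := d.setdefault username PySem.Set.empty
          d'.insert username (PySem.Set.add (d'.getD username PySem.Set.empty) p.1)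
        else d) d)
      (PySem.Dict.mk [])
  duplicates.items

-- ===== PRECONDITION & SPEC =====
-- The argument is a Python dict, so its keys (user ids) are necessarily distinct; an association
-- list with a repeated id encodes no Python input, and Pre_ admits exactly the dict-shaped lists.
def Pre_find_duplicate_usernames_py (userid2username : List (Int × List String)) : Prop :=
  (userid2username.map (fun p => p.1)).Nodup
instance (userid2username : List (Int × List String)) : Decidable (Pre_find_duplicate_usernames_py userid2username) := by unfold Pre_find_duplicate_usernames_py; infer_instance

def pvWitness_find_duplicate_usernames_py : (List (Int × List String)) :=
  [(1, ["alice", "bob"]), (2, ["bob"]), (3, ["carol"])]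

def Spec_find_duplicate_usernames_py (userid2username : List (Int × List String)) (out : List (String × List Int)) : Prop := out = find_duplicate_usernames_py_alt userid2username
instance (userid2username : List (Int × List String)) (out : List (String × List Int)) : Decidable (Spec_find_duplicate_usernames_py userid2username out) := by unfold Spec_find_duplicate_usernames_py; infer_instance

-- ===== CLAIM (what is proved, stated in full; the proofs are below) =====
def Claim_equal_find_duplicate_usernames_py : Prop := ∀ (userid2username : List (Int × List String)), Dom_find_duplicate_usernames_py userid2username → Pre_find_duplicate_usernames_py userid2username → Spec_find_duplicate_usernames_py userid2username (find_duplicate_usernames_py userid2username)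

-- ===== LEMMAS AND PROOFS =====

-- the (user_id, username) pairs of the whole mapping, in traversal order
def pvPairs (l : List (Int × List String)) : List (Int × String) :=
  l.flatMap (fun p => p.2.map (fun n => (p.1, n)))

-- the uniform step A's nested loop performs per (user_id, username) pair
def pvStep (d : PySem.Dict String (PySem.Set Int)) (q : Int × String) : PySem.Dict String (PySem.Set Int) :=
  d.insert q.2 (PySem.Set.add (d.getD q.2 PySem.Set.empty) q.1)

-- B's pass-2 step: the same insertion, but only for flagged usernames
def pvCondStep (flag : String → Bool) (d : PySem.Dict String (PySem.Set Int)) (q : Int × String) :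
    PySem.Dict String (PySem.Set Int) :=
  if flag q.2 then pvStep d q else d

-- the id set both programs associate with username n
def pvIds (l : List (Int × List String)) (n : String) : PySem.Set Int :=
  PySem.Set.update PySem.Set.empty (((pvPairs l).filter (fun q => q.2 == n)).map (·.1))

-- B's pass-1 counter dict
def pvCounts (l : List (Int × List String)) : PySem.Dict String Int :=
  l.foldl (fun c p => (PySem.List.dedup p.2).foldl (fun c username => c.modify username 0 (· + 1)) c)
    (PySem.Dict.mk [])

-- the number of users whose list carries n
def pvCnt (l : List (Int × List String)) (n : String) : Nat :=
  (l.filter (fun p => p.2.contains n)).length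

theorem pv_step_eq (d : PySem.Dict String (PySem.Set Int)) (uid : Int) (n : String) :
    (if d.contains n then d.insert n (PySem.Set.add (d.getD n PySem.Set.empty) uid)
     else d.insert n (PySem.Set.ofList [uid])) = pvStep d (uid, n) := by
  unfold pvStep
  by_cases h : d.contains n
  · rw [if_pos h]
  · rw [if_neg h, PySem.Dict.getD_of_not_contains d PySem.Set.empty (by simpa using h)]
    rfl

theorem pv_A_fold_eq (l : List (Int × List String)) :
    ∀ d, l.foldl (fun m p =>
        p.2.foldl (fun m username =>
          if m.contains username then
            m.insert username (PySem.Set.add (m.getD username PySem.Set.empty) p.1)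
          else
            m.insert username (PySem.Set.ofList [p.1])) m) d
      = (pvPairs l).foldl pvStep d := by
  simp only [pv_step_eq]
  induction l with
  | nil => intro d; rfl
  | cons p t ih =>
    intro d
    simp only [List.foldl_cons, pvPairs, List.flatMap_cons, List.foldl_append, List.foldl_map]
    simp only [pvPairs] at ih
    rw [ih]

theorem pv_getD_foldPairs (P : List (Int × String)) :
    ∀ (d : PySem.Dict String (PySem.Set Int)) (n : String),
      (P.foldl pvStep d).getD n PySem.Set.empty
        = PySem.Set.update (d.getD n PySem.Set.empty) ((P.filter (fun q => q.2 == n)).map (·.1)) := by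
  induction P with
  | nil => intro d n; rfl
  | cons q t ih =>
    intro d n
    simp only [List.foldl_cons, ih, List.filter_cons]
    have hins : (pvStep d q).getD n PySem.Set.empty
        = if n = q.2 then PySem.Set.add (d.getD q.2 PySem.Set.empty) q.1 else d.getD n PySem.Set.empty := by
      unfold pvStep; exact PySem.Dict.getD_insert ..
    rw [hins]
    by_cases h : q.2 = n
    · subst h
      simp only [BEq.rfl, if_pos, List.map_cons]
      rfl
    · have hb : (q.2 == n) = false := by simpa using h
      rw [if_neg (fun hc => h hc.symm), hb]
      simp

theorem pv_add_add_self (s : PySem.Set Int) (a : Int) :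
    PySem.Set.add (PySem.Set.add s a) a = PySem.Set.add s a := by
  by_cases h : PySem.Set.contains s a
  · simp [PySem.Set.add, PySem.Set.contains] at h ⊢
    simp [h]
  · simp [PySem.Set.add, PySem.Set.contains] at h ⊢
    simp [h]

theorem pv_foldl_add_const (a : Int) :
    ∀ (m : Nat) (s : PySem.Set Int),
      (List.replicate m a).foldl PySem.Set.add s = if m = 0 then s else PySem.Set.add s a := by
  intro m
  induction m with
  | zero => intro s; rfl
  | succ k ih =>
    intro s
    rw [List.replicate_succ, List.foldl_cons, ih, if_neg (Nat.succ_ne_zero k)]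
    cases k with
    | zero => rw [if_pos rfl]
    | succ j => rw [if_neg (Nat.succ_ne_zero j), pv_add_add_self]

-- A's accumulated id set equals the set built from one scan of the raw lists
theorem pv_ids_eq (n : String) (l : List (Int × List String)) :
    ∀ s : PySem.Set Int,
      (((pvPairs l).filter (fun q => q.2 == n)).map (·.1)).foldl PySem.Set.add s
        = ((l.filter (fun p => p.2.contains n)).map (·.1)).foldl PySem.Set.add s := by
  induction l with
  | nil => intro s; rfl
  | cons p t ih =>
    intro s
    simp only [pvPairs, List.flatMap_cons, List.filter_append, List.map_append,
      List.foldl_append, List.filter_cons]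
    have hmapfilter :
        ((p.2.map (fun n' => (p.1, n'))).filter (fun q => q.2 == n)).map (fun q : Int × String => q.1)
          = List.replicate (p.2.filter (fun n' => n' == n)).length p.1 := by
      rw [List.filter_map, List.map_map]
      simp only [Function.comp_def]
      exact List.map_const'
    rw [hmapfilter, pv_foldl_add_const]
    simp only [pvPairs] at ih
    by_cases h : p.2.contains n
    · have hne : (p.2.filter (fun n' => n' == n)).length ≠ 0 := by
        simp only [ne_eq, List.length_eq_zero_iff, List.filter_eq_nil_iff]
        intro hall
        have hmem : n ∈ p.2 := by simpa using h
        exact absurd (hall n hmem) (by simp)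
      rw [if_neg hne, h, if_pos rfl]
      simp only [List.map_cons, List.foldl_cons]
      exact ih _
    · have hz : (p.2.filter (fun n' => n' == n)).length = 0 := by
        simp only [List.length_eq_zero_iff, List.filter_eq_nil_iff]
        intro a ha
        simp only [beq_iff_eq]
        intro hEq
        subst hEq
        exact h (by simpa using ha)
      rw [if_pos hz]
      have hb : p.2.contains n = false := by simpa using h
      rw [hb]
      simp only [Bool.false_eq_true, if_neg, not_false_iff]
      exact ih s

-- ===== counts (B pass 1) =====

theorem pv_counts_flatten (l : List (Int × List String)) :
    ∀ c : PySem.Dict String Int,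
      l.foldl (fun c p => (PySem.List.dedup p.2).foldl (fun c username => c.modify username 0 (· + 1)) c) c
        = (l.flatMap (fun p => PySem.List.dedup p.2)).foldl (fun c username => c.modify username 0 (· + 1)) c := by
  induction l with
  | nil => intro c; rfl
  | cons p t ih => intro c; simp only [List.foldl_cons, List.flatMap_cons, List.foldl_append, ih]

theorem pv_count_flat (l : List (Int × List String)) (n : String) :
    (l.flatMap (fun p => PySem.List.dedup p.2)).count n = pvCnt l n := by
  induction l with
  | nil => rfl
  | cons p t ih =>
    unfold pvCnt at ih ⊢
    rw [List.flatMap_cons, List.count_append, List.filter_cons]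
    by_cases h : p.2.contains n
    · have hm : n ∈ PySem.List.dedup p.2 := (PySem.List.mem_dedup p.2 n).mpr (by simpa using h)
      rw [List.count_eq_one_of_mem (PySem.List.nodup_dedup p.2) hm, h, if_pos rfl,
        List.length_cons, ih]
      omega
    · have hm : n ∉ PySem.List.dedup p.2 := fun hc => h (by simpa using (PySem.List.mem_dedup p.2 n).mp hc)
      have hb : p.2.contains n = false := by simpa using h
      rw [List.count_eq_zero.mpr hm, hb, if_neg (by simp), ih]
      omega

theorem pv_counts_getD (l : List (Int × List String)) (n : String) :
    (l.foldl (fun c p => (PySem.List.dedup p.2).foldl (fun c username => c.modify username 0 (· + 1)) c)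
      (PySem.Dict.mk [])).getD n 0 = (pvCnt l n : Int) := by
  rw [pv_counts_flatten, PySem.Dict.getD_foldl_modify_add_one, pv_count_flat]
  rw [show (PySem.Dict.mk ([] : List (String × Int))).getD n 0 = 0 from rfl, zero_add]

-- ===== the conditional insertion fold (B pass 2) =====

theorem pv_cond_step_eq (flag : String → Bool) (c : PySem.Dict String Int)
    (hflag : ∀ n, flag n = decide (1 < c.getD n 0))
    (d : PySem.Dict String (PySem.Set Int)) (uid : Int) (n : String) :
    (if 1 < c.getD n 0 then
      let d' := d.setdefault n PySem.Set.empty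
      d'.insert n (PySem.Set.add (d'.getD n PySem.Set.empty) uid)
    else d) = pvCondStep flag d (uid, n) := by
  unfold pvCondStep pvStep
  rw [hflag n]
  by_cases h : 1 < c.getD n 0
  · rw [if_pos h, if_pos (by simpa using h)]
    have hget : (d.setdefault n PySem.Set.empty).getD n PySem.Set.empty = d.getD n PySem.Set.empty :=
      PySem.Dict.getD_setdefault_self ..
    show (d.setdefault n PySem.Set.empty).insert n
        (PySem.Set.add ((d.setdefault n PySem.Set.empty).getD n PySem.Set.empty) uid) = _
    rw [hget]
    by_cases hc : d.contains n
    · rw [PySem.Dict.setdefault_of_contains _ _ hc]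
    · rw [PySem.Dict.setdefault_of_not_contains _ _ (by simpa using hc),
        PySem.Dict.insert_insert_self]
  · rw [if_neg h, if_neg (by simpa using h)]

theorem pv_B_fold_eq (l : List (Int × List String)) (flag : String → Bool) (c : PySem.Dict String Int)
    (hflag : ∀ n, flag n = decide (1 < c.getD n 0)) :
    ∀ d, l.foldl (fun d p =>
        p.2.foldl (fun d username =>
          if 1 < c.getD username 0 then
            let d' := d.setdefault username PySem.Set.empty
            d'.insert username (PySem.Set.add (d'.getD username PySem.Set.empty) p.1)
          else d) d) d
      = (pvPairs l).foldl (pvCondStep flag) d := by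
  simp only [pv_cond_step_eq flag c hflag]
  induction l with
  | nil => intro d; rfl
  | cons p t ih =>
    intro d
    simp only [List.foldl_cons, pvPairs, List.flatMap_cons, List.foldl_append, List.foldl_map]
    simp only [pvPairs] at ih
    rw [ih]

theorem pv_keys_pvStep (d : PySem.Dict String (PySem.Set Int)) (q : Int × String) :
    (pvStep d q).keys = PySem.Set.add d.keys q.2 := by
  unfold pvStep
  by_cases h : d.contains q.2
  · rw [PySem.Dict.keys_insert_of_contains _ _ h]
    have : PySem.Set.contains d.keys q.2 = true := by
      simpa [PySem.Set.contains] using ((PySem.Dict.contains_iff_mem_keys d q.2).mp h)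
    simp [PySem.Set.add, PySem.Set.contains] at this ⊢
    simp [this]
  · rw [PySem.Dict.keys_insert_of_not_contains _ _ (by simpa using h)]
    have : q.2 ∉ d.keys := fun hm => h ((PySem.Dict.contains_iff_mem_keys d q.2).mpr hm)
    simp [PySem.Set.add, PySem.Set.contains, this]

theorem pv_keys_cond (flag : String → Bool) (P : List (Int × String)) :
    ∀ d, ((P.foldl (pvCondStep flag) d)).keys
      = PySem.Set.update d.keys ((P.filter (fun q => flag q.2)).map (·.2)) := by
  induction P with
  | nil => intro d; rfl
  | cons q t ih =>
    intro d
    simp only [List.foldl_cons, List.filter_cons]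
    by_cases h : flag q.2
    · rw [h, if_pos rfl]
      show (t.foldl (pvCondStep flag) (pvCondStep flag d q)).keys = _
      rw [ih, show pvCondStep flag d q = pvStep d q from if_pos h]
      simp only [List.map_cons]
      rw [show PySem.Set.update d.keys (q.2 :: (t.filter (fun q => flag q.2)).map (·.2))
          = PySem.Set.update (PySem.Set.add d.keys q.2) ((t.filter (fun q => flag q.2)).map (·.2)) from rfl,
        pv_keys_pvStep]
    · have hb : flag q.2 = false := by simpa using h
      rw [hb]
      simp only [Bool.false_eq_true, if_neg, not_false_iff]
      show (t.foldl (pvCondStep flag) (pvCondStep flag d q)).keys = _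
      rw [show pvCondStep flag d q = d from if_neg (by simpa using h), ih]

theorem pv_nodup_cond (flag : String → Bool) (P : List (Int × String)) :
    ∀ d : PySem.Dict String (PySem.Set Int), d.keys.Nodup → (P.foldl (pvCondStep flag) d).keys.Nodup := by
  induction P with
  | nil => intro d h; exact h
  | cons q t ih =>
    intro d h
    simp only [List.foldl_cons]
    apply ih
    unfold pvCondStep
    by_cases hf : flag q.2
    · rw [if_pos hf]; exact PySem.Dict.nodup_keys_insert _ _ _ h
    · rw [if_neg hf]; exact h

theorem pv_getD_cond (flag : String → Bool) (P : List (Int × String)) :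
    ∀ (d : PySem.Dict String (PySem.Set Int)) (n : String),
      (P.foldl (pvCondStep flag) d).getD n PySem.Set.empty
        = if flag n then
            PySem.Set.update (d.getD n PySem.Set.empty) ((P.filter (fun q => q.2 == n)).map (·.1))
          else d.getD n PySem.Set.empty := by
  induction P with
  | nil =>
    intro d n
    by_cases h : flag n <;> simp [h]
  | cons q t ih =>
    intro d n
    simp only [List.foldl_cons, ih, List.filter_cons]
    by_cases hn : q.2 = n
    · subst hn
      by_cases hf : flag q.2
      · rw [show pvCondStep flag d q = pvStep d q from if_pos hf]
        have hins : (pvStep d q).getD q.2 PySem.Set.empty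
            = PySem.Set.add (d.getD q.2 PySem.Set.empty) q.1 := by
          unfold pvStep; exact PySem.Dict.getD_insert_self ..
        rw [if_pos hf, if_pos hf, hins, BEq.rfl, if_pos rfl]
        simp only [List.map_cons]
        rfl
      · have hb : flag q.2 = false := by simpa using hf
        rw [show pvCondStep flag d q = d from if_neg (by simpa using hf), hb]
        simp
    · have hb : (q.2 == n) = false := by simpa using hn
      have hgd : (pvCondStep flag d q).getD n PySem.Set.empty = d.getD n PySem.Set.empty := by
        unfold pvCondStep pvStep
        by_cases hf : flag q.2
        · rw [if_pos hf]
          exact PySem.Dict.getD_insert .. |>.trans (by rw [if_neg (fun hc => hn hc.symm)])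
        · rw [if_neg hf]
      rw [hgd, hb]
      simp

-- ===== ofList commutes with filter =====

theorem pv_add_filter (p : String → Bool) (s : PySem.Set String) (x : String) :
    (PySem.Set.add s x).filter p
      = if p x then PySem.Set.add (s.filter p) x else s.filter p := by
  by_cases hc : x ∈ s
  · have h1 : PySem.Set.add s x = s := by simp [PySem.Set.add, PySem.Set.contains, hc]
    by_cases hp : p x
    · have h2 : PySem.Set.add (s.filter p) x = s.filter p := by
        simp [PySem.Set.add, PySem.Set.contains, List.mem_filter, hc, hp]
      rw [h1, if_pos hp, h2]
    · rw [h1, if_neg hp]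
  · have h1 : PySem.Set.add s x = s ++ [x] := by simp [PySem.Set.add, PySem.Set.contains, hc]
    by_cases hp : p x
    · have h2 : PySem.Set.add (s.filter p) x = s.filter p ++ [x] := by
        have : x ∉ s.filter p := fun hm => hc (List.mem_of_mem_filter hm)
        simp [PySem.Set.add, PySem.Set.contains, this]
      rw [h1, if_pos hp, h2, List.filter_append]
      simp [hp]
    · rw [h1, if_neg hp, List.filter_append]
      simp [hp]

theorem pv_ofList_filter_aux (p : String → Bool) (xs : List String) :
    ∀ s : PySem.Set String,
      (xs.filter p).foldl PySem.Set.add (s.filter p) = (xs.foldl PySem.Set.add s).filter p := by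
  induction xs with
  | nil => intro s; rfl
  | cons x t ih =>
    intro s
    simp only [List.filter_cons, List.foldl_cons]
    by_cases hp : p x
    · rw [hp, if_pos rfl]
      simp only [List.foldl_cons]
      rw [show PySem.Set.add (s.filter p) x = (PySem.Set.add s x).filter p by
        rw [pv_add_filter, if_pos hp]]
      exact ih _
    · have hb : p x = false := by simpa using hp
      rw [hb]
      simp only [Bool.false_eq_true, if_neg, not_false_iff]
      rw [show s.filter p = (PySem.Set.add s x).filter p by rw [pv_add_filter, hb]; simp]
      exact ih _

theorem pv_ofList_filter (p : String → Bool) (xs : List String) :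
    PySem.Set.ofList (xs.filter p) = (PySem.Set.ofList xs).filter p := by
  have h := pv_ofList_filter_aux p xs []
  simpa using h

-- ===== the id set has one element per carrying user (under Pre_) =====

theorem pv_ofList_nodup (xs : List Int) :
    ∀ s : PySem.Set Int, xs.Nodup → (∀ x ∈ xs, x ∉ s) → xs.foldl PySem.Set.add s = s ++ xs := by
  induction xs with
  | nil => intro s _ _; simp
  | cons x t ih =>
    intro s hnd hdisj
    simp only [List.foldl_cons]
    have hx : x ∉ s := hdisj x (by simp)
    have hadd : PySem.Set.add s x = s ++ [x] := by simp [PySem.Set.add, PySem.Set.contains, hx]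
    rw [hadd, ih (s ++ [x]) (List.Nodup.of_cons hnd)
      (fun y hy => by
        simp only [List.mem_append, List.mem_singleton]
        rintro (h1 | h1)
        · exact hdisj y (by simp [hy]) h1
        · subst h1; exact (List.nodup_cons.mp hnd).1 hy)]
    simp

theorem pv_ids_len (l : List (Int × List String)) (n : String)
    (hnd : (l.map (fun p => p.1)).Nodup) :
    (pvIds l n).length = pvCnt l n := by
  have h1 : pvIds l n = ((l.filter (fun p => p.2.contains n)).map (·.1)) := by
    have h2 := pv_ids_eq n l PySem.Set.empty
    have h3 : ((l.filter (fun p => p.2.contains n)).map (·.1)).Nodup := by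
      have hs : ((l.filter (fun p => p.2.contains n)).map (fun p : Int × List String => p.1)).Sublist
          (l.map (fun p => p.1)) := List.Sublist.map _ List.filter_sublist
      exact List.Nodup.sublist hs hnd
    have h4 := pv_ofList_nodup ((l.filter (fun p => p.2.contains n)).map (·.1)) [] h3 (by simp)
    unfold pvIds
    show (((pvPairs l).filter (fun q => q.2 == n)).map (·.1)).foldl PySem.Set.add PySem.Set.empty = _
    rw [h2]
    simpa using h4
  rw [h1]
  simp [pvCnt]

-- ===== VERDICT (by name: the statement is the Claim_ definition above) =====
theorem find_duplicate_usernames_py_spec : Claim_equal_find_duplicate_usernames_py := by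
  intro l _ hpre
  unfold Spec_find_duplicate_usernames_py
  unfold Pre_find_duplicate_usernames_py at hpre
  -- names in first-occurrence order and the flag both sides filter by
  set flag : String → Bool := fun n => decide (1 < (pvCnt l n : Int)) with hflagdef
  have hflag : ∀ n, flag n = decide (1 < (pvCounts l).getD n 0) := by
    intro n
    unfold pvCounts
    rw [pv_counts_getD]
  -- ===== A =====
  have hA : find_duplicate_usernames_py l
      = (((pvPairs l).foldl pvStep (PySem.Dict.mk [])).items).filter (fun q => 1 < q.2.length) := by
    unfold find_duplicate_usernames_py
    rw [pv_A_fold_eq]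
  have hkeysA : ((pvPairs l).foldl pvStep (PySem.Dict.mk [])).keys
      = PySem.Set.ofList ((pvPairs l).map (fun q => q.2)) :=
    PySem.Dict.keys_foldl_insert_key (pvPairs l) (fun q : Int × String => q.2)
      (fun d q => PySem.Set.add (d.getD q.2 PySem.Set.empty) q.1) (PySem.Dict.mk [])
  have hnodupA : ((pvPairs l).foldl pvStep (PySem.Dict.mk [])).keys.Nodup :=
    PySem.Dict.nodup_keys_foldl_insert_key (pvPairs l) (fun q : Int × String => q.2)
      (fun d q => PySem.Set.add (d.getD q.2 PySem.Set.empty) q.1) (PySem.Dict.mk []) (by simp)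
  have hitemsA : (((pvPairs l).foldl pvStep (PySem.Dict.mk [])).items)
      = (PySem.Set.ofList ((pvPairs l).map (fun q => q.2))).map (fun n => (n, pvIds l n)) := by
    rw [PySem.Dict.items_eq_map_keys _ hnodupA PySem.Set.empty, hkeysA]
    exact List.map_congr_left (fun n _ => by rw [pv_getD_foldPairs]; rfl)
  -- ===== B =====
  have hB : find_duplicate_usernames_py_alt l
      = ((pvPairs l).foldl (pvCondStep flag) (PySem.Dict.mk [])).items := by
    unfold find_duplicate_usernames_py_alt
    show (l.foldl (fun d p =>
        p.2.foldl (fun d username =>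
          if 1 < (pvCounts l).getD username 0 then
            let d' := d.setdefault username PySem.Set.empty
            d'.insert username (PySem.Set.add (d'.getD username PySem.Set.empty) p.1)
          else d) d) (PySem.Dict.mk [])).items
      = ((pvPairs l).foldl (pvCondStep flag) (PySem.Dict.mk [])).items
    rw [pv_B_fold_eq l flag (pvCounts l) hflag]
  have hnodupB : ((pvPairs l).foldl (pvCondStep flag) (PySem.Dict.mk [])).keys.Nodup :=
    pv_nodup_cond flag (pvPairs l) _ (by simp)
  have hkeysB : ((pvPairs l).foldl (pvCondStep flag) (PySem.Dict.mk [])).keys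
      = (PySem.Set.ofList ((pvPairs l).map (fun q => q.2))).filter flag := by
    rw [pv_keys_cond]
    have h1 : ((pvPairs l).filter (fun q => flag q.2)).map (fun q : Int × String => q.2)
        = ((pvPairs l).map (fun q => q.2)).filter flag := by
      rw [List.filter_map]; rfl
    show PySem.Set.ofList (((pvPairs l).filter (fun q => flag q.2)).map (fun q : Int × String => q.2)) = _
    rw [h1, pv_ofList_filter]
  have hitemsB : ((pvPairs l).foldl (pvCondStep flag) (PySem.Dict.mk [])).items
      = ((PySem.Set.ofList ((pvPairs l).map (fun q => q.2))).filter flag).map (fun n => (n, pvIds l n)) := by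
    rw [PySem.Dict.items_eq_map_keys _ hnodupB PySem.Set.empty, hkeysB]
    refine List.map_congr_left (fun n hn => ?_)
    have hfn : flag n = true := (List.mem_filter.mp hn).2
    rw [pv_getD_cond, if_pos hfn]
    rfl
  -- ===== combine =====
  rw [hA, hitemsA, hB, hitemsB, List.filter_map]
  congr 1
  refine List.filter_congr (fun n _ => ?_)
  show decide (1 < (pvIds l n).length) = flag n
  rw [pv_ids_len l n hpre, hflagdef]
  simp
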